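-- pv_equiv track=rewrite | github.com/DK2325/RAG_Application | rag_ans.py | _looks_like_refusal
-- ===== SOURCE A (Python) =====
-- def _looks_like_refusal(text: str) -> bool:
--     if not text:
--         return True
--     t = text.lower()
--     phrases = [
--         "cannot answer",
--         "can't answer",
--         "not contain the answer",
--         "not in the context",
--         "information provided",
--         "insufficient information",
--         "do not have enough information",
--     ]
--     return any(p in t for p in phrases)
-- ===== SOURCE B (Python) =====
-- _PHRASES = [
--     "cannot answer",
--     "can't answer",
--     "not contain the answer",
--     "not in the context",
--     "information provided",
--     "insufficient information",
--     "do not have enough information",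
-- ]
--
--
-- def _looks_like_refusal(text: str) -> bool:
--     if not text:
--         return True
--     # Streaming multi-pattern matcher: one pass over the lowered text,
--     # maintaining the set of phrase suffixes still to be matched.
--     active = []
--     for ch in text.lower():
--         active = [r[1:] for r in active + _PHRASES if r[0] == ch]
--         if "" in active:
--             return True
--     return False
-- ===== Notes on version B (the rewrite author's own statement) =====
-- stated objective: alternative
-- what changed: replaces the per-phrase any(p in t) independent substring searches with a single left-to-right streaming pass that maintains the set of still-unmatched phrase suffixes (an Aho-Corasick-style active-state set) and stops at the first completed match
import Mathlib
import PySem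

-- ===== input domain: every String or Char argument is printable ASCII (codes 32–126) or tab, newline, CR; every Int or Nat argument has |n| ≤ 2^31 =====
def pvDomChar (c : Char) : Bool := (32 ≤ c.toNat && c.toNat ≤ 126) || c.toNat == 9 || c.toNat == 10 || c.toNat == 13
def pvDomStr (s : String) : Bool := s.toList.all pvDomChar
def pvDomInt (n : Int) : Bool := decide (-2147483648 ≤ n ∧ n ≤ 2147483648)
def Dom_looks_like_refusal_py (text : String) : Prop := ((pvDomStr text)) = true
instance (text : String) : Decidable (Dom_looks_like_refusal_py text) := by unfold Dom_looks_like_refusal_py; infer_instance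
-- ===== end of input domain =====

-- B replaces A's per-phrase `any(p in t)` substring searches with one streaming pass keeping
-- the set of still-unmatched phrase suffixes (alternative algorithm; not measurably faster).


-- ===== PORT A =====
def looks_like_refusal_py (text : String) : Bool :=
  if text = "" then true
  else
    let t := PySem.Str.lower text
    let phrases : List String :=
      ["cannot answer", "can't answer", "not contain the answer", "not in the context",
       "information provided", "insufficient information", "do not have enough information"]
    phrases.any (fun p => PySem.Str.isIn p t)

-- ===== PORT B =====
def refusalPhrasesB : List (List Char) :=
  ["cannot answer".toList, "can't answer".toList, "not contain the answer".toList,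
   "not in the context".toList, "information provided".toList,
   "insufficient information".toList, "do not have enough information".toList]

-- one loop step: [r[1:] for r in active + _PHRASES if r[0] == ch]
-- (in Python r[0] on an empty r would raise; the loop returns before an empty
-- remainder can re-enter active, so the [] branch here is unreachable)
def refusalStep (active : List (List Char)) (c : Char) : List (List Char) :=
  (active ++ refusalPhrasesB).filterMap fun r =>
    match r with
    | [] => none
    | c' :: rest => if c' == c then some rest else none

def refusalLoop (active : List (List Char)) : List Char → Bool
  | [] => false
  | c :: cs =>
      let a' := refusalStep active c
      if a'.contains [] then true else refusalLoop a' cs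

def looks_like_refusal_py_alt (text : String) : Bool :=
  if text = "" then true
  else refusalLoop [] (PySem.Str.lower text).toList

-- ===== PRECONDITION & SPEC =====
def Spec_looks_like_refusal_py (text : String) (out : Bool) : Prop := out = looks_like_refusal_py_alt text
instance (text : String) (out : Bool) : Decidable (Spec_looks_like_refusal_py text out) := by unfold Spec_looks_like_refusal_py; infer_instance

-- ===== CLAIM (what is proved, stated in full; the proofs are below) =====
def Claim_equal_looks_like_refusal_py : Prop := ∀ (text : String), Dom_looks_like_refusal_py text → Spec_looks_like_refusal_py text (looks_like_refusal_py text)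

-- ===== LEMMAS AND PROOFS =====

lemma mem_refusalStep {active : List (List Char)} {c : Char} {r' : List Char} :
    r' ∈ refusalStep active c ↔ c :: r' ∈ active ∨ c :: r' ∈ refusalPhrasesB := by
  simp only [refusalStep, List.mem_filterMap, List.mem_append]
  constructor
  · rintro ⟨r, hr, h⟩
    cases r with
    | nil => simp at h
    | cons c' rest =>
        by_cases hc : c' = c
        · subst hc
          simp only [beq_self_eq_true, if_true, Option.some.injEq] at h
          subst h; exact hr
        · simp [hc] at h
  · intro h
    exact ⟨c :: r', h, by simp⟩

-- loop invariant: with no empty remainder in `active`, the loop succeeds iff some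
-- active remainder is a prefix of the rest of the text or some phrase occurs in it
lemma refusalLoop_iff (s : List Char) : ∀ (active : List (List Char)), [] ∉ active →
    (refusalLoop active s = true ↔
      (∃ r ∈ active, r <+: s) ∨ (∃ p ∈ refusalPhrasesB, p <:+: s)) := by
  induction s with
  | nil =>
      intro active hact
      simp only [refusalLoop]
      constructor
      · intro h; exact absurd h (by simp)
      · rintro (⟨r, hr, hpre⟩ | ⟨p, hp, hinf⟩)
        · have hr0 : r = [] := List.prefix_nil.mp hpre
          subst hr0; exact absurd hr hact
        · have hp0 : p = [] := List.eq_nil_of_infix_nil hinf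
          subst hp0; exact absurd hp (by decide)
  | cons c cs ih =>
      intro active hact
      simp only [refusalLoop]
      by_cases hempty : ([] : List Char) ∈ refusalStep active c
      · rw [if_pos (by simpa using hempty)]
        simp only [true_iff]
        rcases mem_refusalStep.mp hempty with h | h
        · exact Or.inl ⟨[c], h, ⟨cs, rfl⟩⟩
        · exact Or.inr ⟨[c], h, ⟨[], cs, rfl⟩⟩
      · rw [if_neg (by simpa using hempty)]
        rw [ih _ hempty]
        constructor
        · rintro (⟨r', hr', hpre⟩ | ⟨p, hp, hinf⟩)
          · rcases mem_refusalStep.mp hr' with h | h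
            · exact Or.inl ⟨c :: r', h, List.cons_prefix_cons.mpr ⟨rfl, hpre⟩⟩
            · exact Or.inr ⟨c :: r', h, (List.cons_prefix_cons.mpr ⟨rfl, hpre⟩).isInfix⟩
          · exact Or.inr ⟨p, hp, hinf.trans (List.suffix_cons c cs).isInfix⟩
        · rintro (⟨r, hr, hpre⟩ | ⟨p, hp, hinf⟩)
          · cases r with
            | nil => exact absurd hr hact
            | cons c' r' =>
                obtain ⟨h1, h2⟩ := List.cons_prefix_cons.mp hpre
                subst h1
                exact Or.inl ⟨r', mem_refusalStep.mpr (Or.inl hr), h2⟩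
          · rcases List.infix_cons_iff.mp hinf with hpre | hinf'
            · cases p with
              | nil => exact absurd hp (by decide)
              | cons c' p' =>
                  obtain ⟨h1, h2⟩ := List.cons_prefix_cons.mp hpre
                  subst h1
                  exact Or.inl ⟨p', mem_refusalStep.mpr (Or.inr hp), h2⟩
            · exact Or.inr ⟨p, hp, hinf'⟩

-- ===== VERDICT (by name: the statement is the Claim_ definition above) =====
theorem looks_like_refusal_py_spec : Claim_equal_looks_like_refusal_py := by
  intro text _
  unfold Spec_looks_like_refusal_py looks_like_refusal_py looks_like_refusal_py_alt
  by_cases h : text = ""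
  · simp [h]
  · simp only [h, if_false]
    rw [Bool.eq_iff_iff, refusalLoop_iff _ [] (by simp)]
    rw [show refusalPhrasesB =
      (["cannot answer", "can't answer", "not contain the answer", "not in the context",
        "information provided", "insufficient information",
        "do not have enough information"] : List String).map String.toList from rfl]
    simp [PySem.Chars.isIn_iff_infix]
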